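-- pv_equiv track=rewrite | github.com/tatsuo98se/3d_led_cube2 | libled/util/led_block_util.py | flatten_blocks
-- ===== SOURCE A (Python) =====
-- def get_blocks_in_loop(orders, start):
--     blocks = []
--     for i in range(start, len(orders)):
--         if str(orders[i]['id']) == 'ctrl-1':
--             return blocks
--
--         blocks.append(orders[i])
--
--     return blocks
--
-- def flatten_blocks(orders):
--     flatten = []
--     i = 0
--     while i<len(orders):
--         if orders[i]['id'] == 'ctrl-1':
--             loop = get_blocks_in_loop(orders, i+1)
--             flatten.extend(loop * 3)
--             i += len(loop) + 2
--             continue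
--
--         flatten.append(orders[i])
--         i += 1
--
--     return flatten
-- ===== SOURCE B (Python) =====
-- def flatten_blocks(orders):
--     flatten = []
--     buffer = []
--     in_loop = False
--     for order in orders:
--         if in_loop:
--             if str(order['id']) == 'ctrl-1':
--                 flatten.extend(buffer * 3)
--                 in_loop = False
--             else:
--                 buffer.append(order)
--         elif order['id'] == 'ctrl-1':
--             in_loop = True
--             buffer = []
--         else:
--             flatten.append(order)
--     if in_loop:
--         flatten.extend(buffer * 3)
--     return flatten
-- ===== Notes on version B (the rewrite author's own statement) =====
-- stated objective: simpler
-- what changed: Replaces the lookahead helper plus index-jumping while loop with a single for-loop over the elements carrying an in-loop flag and a buffer that is tripled when the loop closes (or at end-of-input if unclosed).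
import Mathlib
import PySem

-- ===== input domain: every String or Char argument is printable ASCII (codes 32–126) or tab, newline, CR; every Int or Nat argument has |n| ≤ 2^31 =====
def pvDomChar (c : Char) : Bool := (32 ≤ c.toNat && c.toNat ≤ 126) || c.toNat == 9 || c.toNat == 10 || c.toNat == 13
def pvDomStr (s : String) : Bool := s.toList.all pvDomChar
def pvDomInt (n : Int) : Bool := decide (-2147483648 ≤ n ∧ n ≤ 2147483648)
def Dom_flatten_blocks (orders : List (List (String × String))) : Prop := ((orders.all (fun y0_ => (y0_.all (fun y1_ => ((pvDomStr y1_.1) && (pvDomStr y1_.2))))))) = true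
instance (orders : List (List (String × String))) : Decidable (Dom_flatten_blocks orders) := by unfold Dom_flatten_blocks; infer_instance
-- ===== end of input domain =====

-- B replaces the lookahead helper + index-jumping while loop of A with one for-loop
-- over the elements carrying an in-loop flag and a buffer (objective: simpler).

-- shared helper: orders[i]['id'] — first-match dict lookup; "" stands for the KeyError
-- case, which Pre_flatten_blocks excludes (Python raises there)
def pvId (d : List (String × String)) : String := (d.lookup "id").getD ""

-- ===== PORT A =====
-- get_blocks_in_loop: for i in range(start, len(orders)) with early return at 'ctrl-1'
def getBlocksInLoop (orders : List (List (String × String))) (i : Nat)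
    (blocks : List (List (String × String))) : List (List (String × String)) :=
  if h : i < orders.length then
    if pvId orders[i] = "ctrl-1" then blocks
    else getBlocksInLoop orders (i + 1) (blocks ++ [orders[i]])
  else blocks
termination_by orders.length - i

-- the while loop of flatten_blocks, state (flatten, i)
def flattenLoopA (orders : List (List (String × String))) (flatten : List (List (String × String)))
    (i : Nat) : List (List (String × String)) :=
  if h : i < orders.length then
    if pvId orders[i] = "ctrl-1" then
      let loop := getBlocksInLoop orders (i + 1) []
      flattenLoopA orders (flatten ++ (loop ++ loop ++ loop)) (i + loop.length + 2)
    else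
      flattenLoopA orders (flatten ++ [orders[i]]) (i + 1)
  else flatten
termination_by orders.length - i
decreasing_by · omega
              · omega

def flatten_blocks (orders : List (List (String × String))) : List (List (String × String)) :=
  flattenLoopA orders [] 0

-- ===== PORT B =====
-- single pass: state = (in_loop flag, buffer, flatten); trailing unclosed buffer tripled
def flattenLoopB (orders : List (List (String × String))) (inLoop : Bool)
    (buffer flatten : List (List (String × String))) : List (List (String × String)) :=
  match orders with
  | [] => if inLoop then flatten ++ (buffer ++ buffer ++ buffer) else flatten
  | o :: rest =>
    if inLoop then
      if pvId o = "ctrl-1" then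
        flattenLoopB rest false [] (flatten ++ (buffer ++ buffer ++ buffer))
      else
        flattenLoopB rest true (buffer ++ [o]) flatten
    else if pvId o = "ctrl-1" then
      flattenLoopB rest true [] flatten
    else
      flattenLoopB rest false buffer (flatten ++ [o])

def flatten_blocks_alt (orders : List (List (String × String))) : List (List (String × String)) :=
  flattenLoopB orders false [] []

-- ===== PRECONDITION & SPEC =====
-- Pre_ excludes exactly the inputs on which A raises KeyError: an element without key 'id'.
def Pre_flatten_blocks (orders : List (List (String × String))) : Prop :=
  ∀ d ∈ orders, (d.lookup "id").isSome
instance (orders : List (List (String × String))) : Decidable (Pre_flatten_blocks orders) := by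
  unfold Pre_flatten_blocks; infer_instance

def pvWitness_flatten_blocks : (List (List (String × String))) :=
  [[("id", "ctrl-1")], [("id", "a")], [("id", "ctrl-1")], [("id", "b")]]

def Spec_flatten_blocks (orders : List (List (String × String))) (out : List (List (String × String))) : Prop := out = flatten_blocks_alt orders
instance (orders : List (List (String × String))) (out : List (List (String × String))) : Decidable (Spec_flatten_blocks orders out) := by unfold Spec_flatten_blocks; infer_instance

-- ===== CLAIM (what is proved, stated in full; the proofs are below) =====
def Claim_equal_flatten_blocks : Prop := ∀ (orders : List (List (String × String))), Dom_flatten_blocks orders → Pre_flatten_blocks orders → Spec_flatten_blocks orders (flatten_blocks orders)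

-- ===== LEMMAS AND PROOFS =====

-- reference version, recursing on the suffix of orders
def gRef (l : List (List (String × String))) : List (List (String × String)) :=
  match l with
  | [] => []
  | o :: rest => if pvId o = "ctrl-1" then [] else o :: gRef rest

def fRef (l : List (List (String × String))) : List (List (String × String)) :=
  match l with
  | [] => []
  | o :: rest =>
    if pvId o = "ctrl-1" then
      (gRef rest ++ gRef rest ++ gRef rest) ++ fRef (rest.drop ((gRef rest).length + 1))
    else o :: fRef rest
termination_by l.length
decreasing_by · simp [List.length_drop]
              · simp

theorem gA_eq (orders : List (List (String × String))) (i : Nat)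
    (blocks : List (List (String × String))) :
    getBlocksInLoop orders i blocks = blocks ++ gRef (orders.drop i) := by
  by_cases h : i < orders.length
  · have hd : orders.drop i = orders[i] :: orders.drop (i + 1) :=
      List.drop_eq_getElem_cons h
    rw [getBlocksInLoop, hd, gRef]
    by_cases hc : pvId orders[i] = "ctrl-1"
    · simp [h, hc]
    · simp only [h, hc, dif_pos, if_neg, not_false_iff]
      rw [gA_eq orders (i + 1)]
      simp
  · have hn : orders.drop i = [] := List.drop_eq_nil_of_le (by omega)
    rw [getBlocksInLoop]
    simp [h, hn, gRef]
termination_by orders.length - i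

theorem fA_eq (orders : List (List (String × String))) (flatten : List (List (String × String)))
    (i : Nat) :
    flattenLoopA orders flatten i = flatten ++ fRef (orders.drop i) := by
  by_cases h : i < orders.length
  · have hd : orders.drop i = orders[i] :: orders.drop (i + 1) :=
      List.drop_eq_getElem_cons h
    rw [flattenLoopA, hd, fRef]
    by_cases hc : pvId orders[i] = "ctrl-1"
    · simp only [h, hc, dif_pos, if_pos]
      rw [gA_eq orders (i + 1) []]
      rw [fA_eq orders _ _]
      have : orders.drop (i + (gRef (orders.drop (i+1))).length + 2)
           = (orders.drop (i+1)).drop ((gRef (orders.drop (i+1))).length + 1) := by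
        rw [List.drop_drop]; ring_nf
      simp [this]
    · simp only [h, hc, dif_pos, if_neg, not_false_iff]
      rw [fA_eq orders _ (i + 1)]
      simp
  · have hn : orders.drop i = [] := List.drop_eq_nil_of_le (by omega)
    rw [flattenLoopA]
    simp [h, hn, fRef]
termination_by orders.length - i
decreasing_by · omega
              · omega

theorem fB_eq (orders : List (List (String × String))) :
    (∀ flatten, flattenLoopB orders false [] flatten = flatten ++ fRef orders) ∧
    (∀ buffer flatten, flattenLoopB orders true buffer flatten =
      flatten ++ (buffer ++ gRef orders ++ (buffer ++ gRef orders) ++ (buffer ++ gRef orders))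
        ++ fRef (orders.drop ((gRef orders).length + 1))) := by
  induction orders with
  | nil =>
    constructor
    · intro flatten; simp [flattenLoopB, fRef]
    · intro buffer flatten; simp [flattenLoopB, gRef, fRef]
  | cons o rest ih =>
    constructor
    · intro flatten
      rw [flattenLoopB, fRef]
      by_cases hc : pvId o = "ctrl-1"
      · simp only [hc, if_pos, Bool.false_eq_true, if_neg, not_false_iff]
        rw [ih.2 [] flatten]
        simp
      · simp only [hc, if_neg, not_false_iff, Bool.false_eq_true]
        rw [ih.1]
        simp
    · intro buffer flatten
      rw [flattenLoopB, gRef]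
      by_cases hc : pvId o = "ctrl-1"
      · simp only [hc, if_pos]
        rw [ih.1]
        simp
      · simp only [hc, if_neg, not_false_iff]
        rw [ih.2]
        simp [List.drop_succ_cons]
  
-- ===== VERDICT (by name: the statement is the Claim_ definition above) =====
theorem flatten_blocks_spec : Claim_equal_flatten_blocks := by
  intro orders _ _
  unfold Spec_flatten_blocks flatten_blocks flatten_blocks_alt
  rw [fA_eq, (fB_eq orders).1]
  simp
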